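/- GENERATED by tools/from_farm_form.py from prooffarm-gif/accepted/DGifGetWord.1/Lemmas.lean (a worked proof of the farm's unit `DGifGetWord.1`,
   accepted by the verdict) — do not edit. -/
import Gif.Spec.Units.DGifGetWord_1
import Gif.Spec.AllSegs

/-!
  Lemmas for the unit `DGifGetWord.1` (the BODY of a protected function: a reader call into an object of the OWN frame, then a
  checked store into a scalar field of gif): the segment is walked in TWO STEPS that meet at the call's return address 0x106072
  (`ret1`), with a private assertion there.

      gw1_AtRet1       the assertion at `ret1`: `Body` + the registers and facts that are live THERE (R2 of Gif/Spec/ReaderSegs.lean)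
      gw1_seg_call     0x106063 … the call of InternalRead … 0x106072: `Start` → `gw1_AtRet1`
      gw1_seg_tail     0x106072 … 0x10608c (both arms): `gw1_AtRet1` → `Done`

  The general lemmas are those of Gif/Spec/FrameCarry.lean §5 (`Env.at_call`, `store_stack`, `store_gif`, `word16_le`) and
  Gif/Spec/Carry.lean §4 (`BufOK.own`).
-/

open X86 X86.User Asan ProgX.Base ProgX.Base.Spec Gif.Spec

set_option maxRecDepth 4000
set_option maxHeartbeats 4000000

namespace Gif.Spec.DGifGetWord_1

/-- **At 106072H (ret1), `InternalRead(gif, c, 2)` has returned**: `Body`, `rbp = gif`, `r12 = Word`, `*Word` untouched, `eax = k ≤ 2`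
the bytes delivered, and `k = 2` means the reader advanced by exactly 2. -/
structure gw1_AtRet1 (H : Heap) (rest : List Obj) (frames : List (Nat × FrameLayout)) (F : Forest) (R : Rd) (u₀ e : State)
    (ret : Word) (v : State) : Prop where
  body : DGifGetWord.Body Gif.L.DGifGetWord.ret1 H rest frames F R u₀ e ret v
  rbp : v.reg .rbp = e.reg .rdi
  r12 : v.reg .r12 = e.reg .rsi
  word : rd v.mem (e.reg .rsi).toNat 4 = rd e.mem (e.reg .rsi).toNat 4
  count : (v.reg .rax).toNat ≤ 2
  adv : (v.reg .rax).toNat = 2 → rem R v.mem + 2 = rem R e.mem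

/-- **106063H … the call of InternalRead … 106072H (ret1)** (dgif_lib.c:744 `InternalRead(GifFile, c, 2)`). `edx = 2`,
`rsi = &c = RA − 56` (the frame's object `c` at base + 32), `rdi = gif` still from the entry (`Start.rdi`). -/
theorem gw1_seg_call (Lay : Layout) (hLay : Lay.hi = 0x1000000) (μ : Microarch) (hμ : UserX.MicroOK μ) (u₀ : State)
    (hcode : HasCodeNat Lay u₀ Gif.L.DGifGetWord.entry Gif.Code.code_DGifGetWord.nat Gif.L.DGifGetWord.size)
    (H : Heap) (rest : List Obj) (frames : List (Nat × FrameLayout)) (F : Forest) (R : Rd) (e : State) (ret : Word)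
    (h_InternalRead : Calls Lay μ ProgX.Base.WayInv (ProgX.Base.conv u₀) Gif.L.InternalRead.entry
      (Gif.Spec.InternalRead.spec H rest (DGifGetWord.framesIn frames e) F R 2))
    (v : State) (hat : DGifGetWord.Start H rest frames F R u₀ e ret v) :
    ReachVia Lay μ ProgX.Base.WayInv v (gw1_AtRet1 H rest frames F R u₀ e ret) := by
  -- THE PRELUDE: the entry assertion `Start` = `Body` + where the arguments are + the prologue's footprint
  have hrem_eq := hat.rem_eq
  have hword0 := hat.word_eq
  obtain ⟨hbody, c_rbp, c_r12, c_rdi, hsame0⟩ := hat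
  have he := hbody.entry
  v_entry he
  obtain ⟨henv, hrdi, hword⟩ := hbody.pre
  -- what the walker reads of a segment's entry state: rip, rsp (as `c_rsp`), the registers kept, the text, DF / MXCSR
  have w_rip := hbody.rip
  have c_rsp : v.reg .rsp = e.reg .rsp - 88 := hbody.rsp
  have w_kept : RegsKept [.rsp] v v := RegsKept.refl _ _
  have w_eq : Mem.EqOn ProgX.Base.L.textLo ProgX.Base.L.textHi u₀.mem v.mem := ProgX.Base.conv_code_eqOn hbody.code
  have hdf := (show abiInv _ from hbody.abi).1
  have hmx := (show abiInv _ from hbody.abi).2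
  have hsse := ProgX.Base.sseOK_of_abiInv hbody.abi
  -- the slots and the footprint that `Body` at the exit states again
  have k_r12 : v.mem.readLE (e.reg .rsp - 8) 8 = (e.reg .r12).toNat := hbody.slot_r12
  have k_rbp : v.mem.readLE (e.reg .rsp - 16) 8 = (e.reg .rbp).toNat := hbody.slot_rbp
  have k_rbx : v.mem.readLE (e.reg .rsp - 24) 8 = (e.reg .rbx).toNat := hbody.slot_rbx
  have k_ra : UInt64.ofNat (v.mem.readLE (e.reg .rsp) 8) = ret := hbody.slot_ra
  have hsame : Mem.SameExcept
    [⟨(e.reg .rsp).toNat - 272, (e.reg .rsp).toNat⟩,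
     shadowSpan ((e.reg .rsp).toNat - 88) ((e.reg .rsp).toNat - 24),
     ⟨(e.reg .rsi).toNat, (e.reg .rsi).toNat + 4⟩,
     ⟨F.gif + 96, F.gif + 100⟩,
     ⟨R.cur, R.cur + 8⟩] e.mem v.mem := hbody.same
  -- where the cursor and gif are, as numbers (`v_side`, `u_same`, `u_omega` place every store with them)
  have hcur := henv.ctx.cursor_range henv.heap.inv.shadow
  have hgin := henv.ok.owns.inside henv.heap.inv.heap (o := (F.gif, 120)) List.mem_cons_self
  have hbase := henv.heap.base
  simp only at hgin
  rw [hbase] at hgin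
  -- THE WALK, to the call's return address
  u_walk hcode [hμ.vendor] until [Gif.L.DGifGetWord.ret1] span [ProgX.Base.L.textLo, ProgX.Base.L.textHi] side (v_side)
  case call_inv =>
    v_inv
  case pre_10606d =>
    -- INTERNALREAD'S PRECONDITION. The environment for the frame list with the own frame in front: only the return address was
    -- pushed since `v`
    have hs : Mem.SameExcept [⟨(e.reg .rsp).toNat - 272, (e.reg .rsp).toNat - 88⟩] v.mem s_10606d.mem := by
      rw [w_mem]
      u_same
    have henv' : Env H rest (DGifGetWord.framesIn frames e) F R s_10606d := by
      refine henv.at_call hbody.inv hbody.ok hs (by omega) (by omega) ?_ ?_ ?_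
      · rw [w_rsp]
        u_omega
      · rw [w_rsp]
        u_omega
      · rw [w_rsp]
        u_omega
    -- the buffer is the frame's object `c` (`[rsp + 0x20]` = base + 32, 2 bytes), named by its numbers
    have ho : (⟨(e.reg .rsp).toNat - 88 + 32, 2, .stack⟩ : Obj) ∈
        Gif.Frames.DGifGetWord.objsAt ((e.reg .rsp).toNat - 88) := List.mem_cons_self
    have hsz : Gif.Frames.DGifGetWord.size = 64 := rfl
    have hb : (e.reg .rsp).toNat - 88 + Gif.Frames.DGifGetWord.size ≤ (e.reg .rsp).toNat + 8 := by
      rw [hsz]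
      omega
    have hbuf : BufOK H rest (DGifGetWord.framesIn frames e) F R (s_10606d.reg .rsi).toNat 2 := by
      apply BufOK.own henv.heap henv.ctx hbody.inv hb ho
      · rw [w_rsi]
        u_omega
      · rw [w_rsi]
        u_omega
    -- the five clauses: `Env`, `rdi = gif`, `edx = 2`, `1 ≤ 2`, `2 < 2 ^ 31`, `BufOK`
    refine ⟨henv', ?_, ?_, by decide, by decide, hbuf⟩
    · rw [w_kept.get .rdi rfl, c_rdi]
      exact hrdi
    · rw [w_rdx]
      decide
  -- 0x106072 (ret1): INTERNALREAD HAS RETURNED. Its post: `k` bytes delivered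
  obtain ⟨k, hk1, hk2, hk3, hk4, hk5, hback⟩ : ReadPost H rest (DGifGetWord.framesIn frames e) F R 2 s_10606d s_10606dr := w_post
  -- the reader at InternalRead's entry is the entry's: only the return address was pushed
  have hs0 : Mem.SameExcept [⟨(e.reg .rsp).toNat - 272, (e.reg .rsp).toNat - 88⟩] v.mem s_10606d.mem := by
    rw [w_mem_10606d]
    u_same
  have hrem0 : rem R s_10606d.mem = rem R e.mem := by
    rw [← hrem_eq]
    apply rem_sameExcept hs0 (by omega)
    intro w hw
    have e := List.mem_singleton.mp hw
    rw [e]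
    simp only
    omega
  have e_top : (s_10606d.reg .rsp).toNat + 8 = (e.reg .rsp).toNat - 88 := by
    rw [w_rsp_10606d]
    u_omega
  -- the callee's footprint in terms of `v` (`w_same : SameExcept […] v.mem s_10606dr.mem`)
  v_after_call w_rsp_10606d w_mem_10606d
  simp only [w_rsi_10606d] at w_same
  -- THE SLOTS, THE RETURN ADDRESS AND `*Word`, over the pushed return address (first step) and through InternalRead's footprint
  -- (second step: the buffer `c`, the cursor, the stack below)
  have hp12 : s_10606d.mem.readLE (e.reg .rsp - 8) 8 = (e.reg .r12).toNat := by
    rw [w_mem_10606d]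
    u_frame k_r12
  rw [w_mem_10606d] at hp12
  have hs12 : s_10606dr.mem.readLE (e.reg .rsp - 8) 8 = (e.reg .r12).toNat := by u_frame hp12
  have hpbp : s_10606d.mem.readLE (e.reg .rsp - 16) 8 = (e.reg .rbp).toNat := by
    rw [w_mem_10606d]
    u_frame k_rbp
  rw [w_mem_10606d] at hpbp
  have hsbp : s_10606dr.mem.readLE (e.reg .rsp - 16) 8 = (e.reg .rbp).toNat := by u_frame hpbp
  have hpbx : s_10606d.mem.readLE (e.reg .rsp - 24) 8 = (e.reg .rbx).toNat := by
    rw [w_mem_10606d]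
    u_frame k_rbx
  rw [w_mem_10606d] at hpbx
  have hsbx : s_10606dr.mem.readLE (e.reg .rsp - 24) 8 = (e.reg .rbx).toNat := by u_frame hpbx
  have hpra : UInt64.ofNat (s_10606d.mem.readLE (e.reg .rsp) 8) = ret := by
    rw [w_mem_10606d]
    u_frame k_ra
  rw [w_mem_10606d] at hpra
  have hsra : UInt64.ofNat (s_10606dr.mem.readLE (e.reg .rsp) 8) = ret := by u_frame hpra
  have hpw : s_10606d.mem.readLE (e.reg .rsi) 4 = rd e.mem (e.reg .rsi).toNat 4 := by
    rw [w_mem_10606d]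
    have h0 : v.mem.readLE (e.reg .rsi) 4 = rd e.mem (e.reg .rsi).toNat 4 := by
      rw [rd_eq_readLE v.mem (e.reg .rsi) (e.reg .rsi).toNat 4 rfl]
      exact hword0
    u_frame h0
  rw [w_mem_10606d] at hpw
  have hsw : s_10606dr.mem.readLE (e.reg .rsi) 4 = rd e.mem (e.reg .rsi).toNat 4 := by u_frame hpw
  -- the footprint since the entry: InternalRead's windows lie inside the function's
  have hsame1 : Mem.SameExcept
    [⟨(e.reg .rsp).toNat - 272, (e.reg .rsp).toNat⟩,
     shadowSpan ((e.reg .rsp).toNat - 88) ((e.reg .rsp).toNat - 24),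
     ⟨(e.reg .rsi).toNat, (e.reg .rsi).toNat + 4⟩,
     ⟨F.gif + 96, F.gif + 100⟩,
     ⟨R.cur, R.cur + 8⟩] e.mem s_10606dr.mem := by u_same
  -- the heap's invariant comes back with the clean stack at the callee's `rsp + 8` = the body's `rsp`
  have hinv1 : HeapInv H rest (DGifGetWord.framesIn frames e) ((e.reg .rsp).toNat - 88) s_10606dr.mem := by
    rw [← e_top]
    exact hback.inv
  -- THE EXIT ASSERTION: `Body` at `ret1` …
  have hbody1 : DGifGetWord.Body Gif.L.DGifGetWord.ret1 H rest frames F R u₀ e ret s_10606dr := {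
    entry := hbody.entry
    pre := hbody.pre
    rip := w_rip
    rsp := w_rsp
    rbx := (w_kept.get .rbx rfl).trans hbody.rbx
    r13 := (w_kept.get .r13 rfl).trans hbody.r13
    r14 := (w_kept.get .r14 rfl).trans hbody.r14
    r15 := (w_kept.get .r15 rfl).trans hbody.r15
    slot_r12 := hs12
    slot_rbp := hsbp
    slot_rbx := hsbx
    slot_ra := hsra
    inv := hinv1
    ok := hback.ok
    rem := by
      rw [← hrem0]
      exact hback.rem
    same := hsame1
    code := w_code
    abi := w_inv
  }
  -- … and what is live at `ret1`: gif and Word in their registers, `*Word` untouched, the count in `eax`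
  refine ReachVia.done ?_
  exact {
    body := hbody1
    rbp := (w_kept.get .rbp rfl).trans c_rbp
    r12 := (w_kept.get .r12 rfl).trans c_r12
    word := by
      rw [← rd_eq_readLE s_10606dr.mem (e.reg .rsi) (e.reg .rsi).toNat 4 rfl]
      exact hsw
    count := by
      rw [hk4]
      exact hk1
    adv := by
      intro h2
      rw [hk4] at h2
      rw [hk5, hrem0]
      rw [hrem0] at hk2
      omega
  }

/-- **106072H (ret1) … 10608CH** (dgif_lib.c:744-750): `cmp eax, 2`; fewer than 2 bytes: the checked store of `gif.Error = 102`,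
`eax = 0`; 2 bytes: the word `c[0] | c[1] << 8` in `ebp`, the checked store of `*Word`, `eax = 1`. -/
theorem gw1_seg_tail (Lay : Layout) (hLay : Lay.hi = 0x1000000) (μ : Microarch) (hμ : UserX.MicroOK μ) (u₀ : State)
    (hcode : HasCodeNat Lay u₀ Gif.L.DGifGetWord.entry Gif.Code.code_DGifGetWord.nat Gif.L.DGifGetWord.size)
    (H : Heap) (rest : List Obj) (frames : List (Nat × FrameLayout)) (F : Forest) (R : Rd) (e : State) (ret : Word)
    (h_asan_store4_noabort : Asan.SmallCheck Lay μ ProgX.Base.WayInv (ProgX.Base.CodeOK u₀) [.rax, .rcx, .rdx] 4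
      ProgX.Base.L.__asan_store4_noabort.entry)
    (v : State) (hat : gw1_AtRet1 H rest frames F R u₀ e ret v) :
    ReachVia Lay μ ProgX.Base.WayInv v (DGifGetWord.Done H rest frames F R u₀ e ret) := by
  -- THE PRELUDE: the entry assertion, as in `gw1_seg_call`
  obtain ⟨hbody, c_rbp, c_r12, hword1, hcount, hadv⟩ := hat
  have he := hbody.entry
  v_entry he
  obtain ⟨henv, hrdi, hword⟩ := hbody.pre
  have w_rip := hbody.rip
  have c_rsp : v.reg .rsp = e.reg .rsp - 88 := hbody.rsp
  -- `eax` as a variable `z` (the branch fact of `cmp eax, 2` speaks of it)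
  obtain ⟨z, c_rax⟩ : ∃ z, v.reg .rax = z := ⟨_, rfl⟩
  rw [c_rax] at hcount hadv
  have w_kept : RegsKept [.rsp] v v := RegsKept.refl _ _
  have w_eq : Mem.EqOn ProgX.Base.L.textLo ProgX.Base.L.textHi u₀.mem v.mem := ProgX.Base.conv_code_eqOn hbody.code
  have hdf := (show abiInv _ from hbody.abi).1
  have hmx := (show abiInv _ from hbody.abi).2
  have hsse := ProgX.Base.sseOK_of_abiInv hbody.abi
  have k_r12 : v.mem.readLE (e.reg .rsp - 8) 8 = (e.reg .r12).toNat := hbody.slot_r12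
  have k_rbp : v.mem.readLE (e.reg .rsp - 16) 8 = (e.reg .rbp).toNat := hbody.slot_rbp
  have k_rbx : v.mem.readLE (e.reg .rsp - 24) 8 = (e.reg .rbx).toNat := hbody.slot_rbx
  have k_ra : UInt64.ofNat (v.mem.readLE (e.reg .rsp) 8) = ret := hbody.slot_ra
  have hsame : Mem.SameExcept
    [⟨(e.reg .rsp).toNat - 272, (e.reg .rsp).toNat⟩,
     shadowSpan ((e.reg .rsp).toNat - 88) ((e.reg .rsp).toNat - 24),
     ⟨(e.reg .rsi).toNat, (e.reg .rsi).toNat + 4⟩,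
     ⟨F.gif + 96, F.gif + 100⟩,
     ⟨R.cur, R.cur + 8⟩] e.mem v.mem := hbody.same
  have hcur := henv.ctx.cursor_range henv.heap.inv.shadow
  have hgin := henv.ok.owns.inside henv.heap.inv.heap (o := (F.gif, 120)) List.mem_cons_self
  have hbase := henv.heap.base
  simp only at hgin
  rw [hbase] at hgin
  -- gif is live under the body's frames: what both check goals ask
  have hgl : LiveIn (H.liveObjs ++ rest) (DGifGetWord.framesIn frames e) F.gif 120 :=
    hbody.ok.gif_live.liveIn rest _ (Nat.le_refl _) (Nat.le_refl _)
  -- THE WALK, both arms, to the epilogue's first instruction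
  u_walk hcode [hμ.vendor] until [Gif.L.DGifGetWord.at_10608c] span [ProgX.Base.L.textLo, ProgX.Base.L.textHi] side (v_side)
  case check_1060b2 =>
    -- dgif_lib.c:749 the store of `*Word`: 4 bytes inside gif
    have hun : ShadowUntouched v.mem s_1060b2.mem := by v_untouched
    exact hgl.accSmall hbody.inv.shadow hun _ 4 (by decide) (by u_omega) (by u_omega)
  case check_10607b =>
    -- dgif_lib.c:745 the store of `gif.Error`
    have hun : ShadowUntouched v.mem s_10607b.mem := by v_untouched
    exact hgl.accSmall hbody.inv.shadow hun _ 4 (by decide) (by u_omega) (by u_omega)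
  · -- 0x10608c FROM 0x1060c0: two bytes were read, `*Word` stored, eax = 1
    -- the two bytes of `c` and the word made of them, as variables
    obtain ⟨x, hx⟩ : ∃ x : BitVec 8, x = BitVec.ofNat 8 (v.mem.readLE (e.reg .rsp - 56) 1) := ⟨_, rfl⟩
    obtain ⟨y, hy⟩ : ∃ y : BitVec 8, y = BitVec.ofNat 8 (v.mem.readLE (e.reg .rsp - 55) 1) := ⟨_, rfl⟩
    rw [← hx, ← hy] at w_mem
    have hval := word16_le x y
    obtain ⟨val, hvaldef⟩ : ∃ val : Nat, val = (BitVec.zeroExtend 32 x ||| BitVec.zeroExtend 32 y <<< 8).toNat := ⟨_, rfl⟩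
    rw [← hvaldef] at w_mem hval
    clear hvaldef hx hy w_rbp
    -- the branch fact of `cmp eax, 2 ; je`: `eax = 2`
    have hz : z.toNat = 2 := by
      rw [toNat_part32] at hbr_106075
      have e2 : (2 : Nat) % 2 ^ Width.w32.bits = 2 := by decide
      rw [e2] at hbr_106075
      omega
    clear hbr_106075
    -- the two stores since `v`: the check call's return address (stack), then `*Word` (a scalar field of gif)
    obtain ⟨hinvA, hokA, hremA⟩ := store_stack hbody.inv hbody.ok ⟨hcur.1, hcur.2.1⟩ (e.reg .rsp - 96) 8 1073335
      (by u_omega) (by u_omega)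
    obtain ⟨hinvB, hokB, hremB⟩ := store_gif hinvA hokA ⟨hcur.1, hcur.2.1⟩ hbase (e.reg .rsi) 4 val (by omega)
    rw [← w_mem] at hinvB hokB hremB
    have hremF : rem R s_1060c0.mem = rem R v.mem := hremB.trans hremA
    -- THE EXIT ASSERTION: `Body` at 0x10608c …
    have hbody1 : DGifGetWord.Body Gif.L.DGifGetWord.at_10608c H rest frames F R u₀ e ret s_1060c0 := {
      entry := hbody.entry
      pre := hbody.pre
      rip := w_rip
      rsp := w_rsp
      rbx := (w_kept.get .rbx rfl).trans hbody.rbx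
      r13 := (w_kept.get .r13 rfl).trans hbody.r13
      r14 := (w_kept.get .r14 rfl).trans hbody.r14
      r15 := (w_kept.get .r15 rfl).trans hbody.r15
      slot_r12 := by
        rw [w_mem]
        u_frame k_r12
      slot_rbp := by
        rw [w_mem]
        u_frame k_rbp
      slot_rbx := by
        rw [w_mem]
        u_frame k_rbx
      slot_ra := by
        rw [w_mem]
        u_frame k_ra
      inv := hinvB
      ok := hokB
      rem := by
        rw [hremF]
        exact hbody.rem
      same := by
        rw [w_mem]
        u_same
      code := ProgX.Base.conv_code_in w_eq
      abi := by
        refine ProgX.Base.abiInv_of ?_ ?_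
        · rw [w_flags]
          exact w_df_1060b2
        · rw [w_mxcsr]
          exact hmx
    }
    -- … and the results: GIF_OK, the word fits 16 bits, exactly two bytes consumed
    refine ReachVia.done ?_
    exact {
      body := hbody1
      res := by
        left
        rw [w_rax]
        decide
      ok1 := by
        intro _
        refine ⟨?_, ?_⟩
        · rw [w_mem, rd_writeLE_same _ (e.reg .rsi) 4 val _ rfl (by decide)]
          omega
        · rw [hremF]
          exact hadv hz
      ok0 := by
        intro h0
        rw [w_rax] at h0
        exact absurd h0 (by decide)
    }
  · -- 0x10608c FROM 0x106087: fewer than two bytes, `gif.Error = D_GIF_ERR_READ_FAILED` stored, eax = 0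
    -- the two stores since `v`: the check call's return address (stack), then `gif.Error`
    obtain ⟨hinvA, hokA, hremA⟩ := store_stack hbody.inv hbody.ok ⟨hcur.1, hcur.2.1⟩ (e.reg .rsp - 96) 8 1073280
      (by u_omega) (by u_omega)
    obtain ⟨hinvB, hokB, hremB⟩ := store_gif hinvA hokA ⟨hcur.1, hcur.2.1⟩ hbase (e.reg .rdi + 96) 4 102
      (Or.inr (Or.inr (by u_omega)))
    rw [← w_mem] at hinvB hokB hremB
    have hremF : rem R s_106087.mem = rem R v.mem := hremB.trans hremA
    -- THE EXIT ASSERTION: `Body` at 0x10608c …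
    have hbody1 : DGifGetWord.Body Gif.L.DGifGetWord.at_10608c H rest frames F R u₀ e ret s_106087 := {
      entry := hbody.entry
      pre := hbody.pre
      rip := w_rip
      rsp := w_rsp
      rbx := (w_kept.get .rbx rfl).trans hbody.rbx
      r13 := (w_kept.get .r13 rfl).trans hbody.r13
      r14 := (w_kept.get .r14 rfl).trans hbody.r14
      r15 := (w_kept.get .r15 rfl).trans hbody.r15
      slot_r12 := by
        rw [w_mem]
        u_frame k_r12
      slot_rbp := by
        rw [w_mem]
        u_frame k_rbp
      slot_rbx := by
        rw [w_mem]
        u_frame k_rbx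
      slot_ra := by
        rw [w_mem]
        u_frame k_ra
      inv := hinvB
      ok := hokB
      rem := by
        rw [hremF]
        exact hbody.rem
      same := by
        rw [w_mem]
        u_same
      code := ProgX.Base.conv_code_in w_eq
      abi := by
        refine ProgX.Base.abiInv_of ?_ ?_
        · rw [w_flags]
          exact w_df_10607b
        · rw [w_mxcsr]
          exact hmx
    }
    -- … and the results: GIF_ERROR, `*Word` untouched (two stores elsewhere)
    refine ReachVia.done ?_
    exact {
      body := hbody1
      res := by
        right
        rw [w_rax]
        decide
      ok1 := by
        intro h1
        rw [w_rax] at h1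
        exact absurd h1 (by decide)
      ok0 := by
        intro _
        rw [w_mem]
        rw [rd_writeLE_disjoint _ _ _ _ _ _ (by u_omega) (by omega) (by u_omega)]
        rw [rd_writeLE_disjoint _ _ _ _ _ _ (by u_omega) (by omega) (by u_omega)]
        exact hword1
    }

end Gif.Spec.DGifGetWord_1
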